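-- pv_equiv track=rewrite | github.com/cdogor/Geog-test-v6 | streamlit_app.py | add_canonical_layer
-- ===== SOURCE A (Python) =====
-- def add_canonical_layer(pb):
--
--     # ── PROPAGATION ──────────────────────────
--     prop = str(pb.get("propagation", "")).lower()
--     if "elastic" in prop or ("wave" in prop and "electro" not in prop and "gpr" not in prop):
--         pb["propagation_canonical"] = "elastic_wave_propagation"
--     elif "electromagnetic" in prop or "gpr" in prop:
--         pb["propagation_canonical"] = "electromagnetic_wave_propagation"
--     elif "electrical" in prop or "resistivity" in prop or "conduction" in prop:
--         pb["propagation_canonical"] = "electrical_conduction"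
--     elif "gravity" in prop or "magnetic" in prop or "potential" in prop:
--         pb["propagation_canonical"] = "potential_field_response"
--     elif "diffusion" in prop:
--         pb["propagation_canonical"] = "diffusion_process"
--     elif "flow" in prop or "hydraulic" in prop:
--         pb["propagation_canonical"] = "fluid_flow"
--     elif "electrokinetic" in prop:
--         pb["propagation_canonical"] = "electrokinetic_coupling"
--     else:
--         pb["propagation_canonical"] = "physical_field_propagation"
--
--     # ── SOURCE ───────────────────────────────
--     src = str(pb.get("source", "")).lower()
--     if any(x in src for x in ["hammer", "impact", "vibroseis", "explosive", "drop weight"]):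
--         pb["source_canonical"] = "mechanical_source"
--     elif any(x in src for x in ["electrode", "current", "injection", "dipole"]):
--         pb["source_canonical"] = "electrical_source"
--     elif any(x in src for x in ["antenna", "radar", "em coil", "transmitter"]):
--         pb["source_canonical"] = "electromagnetic_source"
--     elif any(x in src for x in ["gravity", "magnetic field", "natural"]):
--         pb["source_canonical"] = "natural_field_source"
--     else:
--         pb["source_canonical"] = "unknown_source"
--
--     # ── RECEIVER ─────────────────────────────
--     rec = str(pb.get("receiver", "")).lower()
--     if any(x in rec for x in ["geophone", "accelerometer", "seismometer"]):
--         pb["receiver_canonical"] = "seismic_sensor"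
--     elif any(x in rec for x in ["electrode", "electric"]):
--         pb["receiver_canonical"] = "electrical_sensor"
--     elif any(x in rec for x in ["antenna", "radar"]):
--         pb["receiver_canonical"] = "electromagnetic_sensor"
--     elif any(x in rec for x in ["gravimeter", "magnetometer"]):
--         pb["receiver_canonical"] = "field_sensor"
--     else:
--         pb["receiver_canonical"] = "generic_sensor"
--
--     # ── OBSERVABLE ───────────────────────────
--     obs = str(pb.get("observable", "")).lower()
--     if any(x in obs for x in ["time", "travel", "traveltime", "arrival"]):
--         pb["observable_canonical"] = "travel_time"
--     elif any(x in obs for x in ["amplitude", "trace", "waveform"]):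
--         pb["observable_canonical"] = "waveform_response"
--     elif any(x in obs for x in ["voltage", "potential", "sp"]):
--         pb["observable_canonical"] = "voltage_response"
--     elif any(x in obs for x in ["frequency", "dispersion", "spectral"]):
--         pb["observable_canonical"] = "spectral_response"
--     elif any(x in obs for x in ["apparent", "transfer"]):
--         pb["observable_canonical"] = "apparent_quantity"
--     else:
--         pb["observable_canonical"] = "physical_response"
--
--     # ── MEDIUM ───────────────────────────────
--     pb["medium_canonical"] = "subsurface_medium"
--
--     return pb
-- ===== SOURCE B (Python) =====
-- # B: per field, collect the ranks of ALL matching keywords from a flattened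
-- # (keyword, rank) list and take the numeric minimum to index a label array;
-- # all fields are read up front and the five canonical keys assigned at the end.
-- # Mutates pb in place, like the original.
--
-- PROP_LABELS = [
--     "electromagnetic_wave_propagation",
--     "electrical_conduction",
--     "potential_field_response",
--     "diffusion_process",
--     "fluid_flow",
--     "electrokinetic_coupling",
-- ]
-- PROP_RULES = [
--     ["electromagnetic", "gpr"],
--     ["electrical", "resistivity", "conduction"],
--     ["gravity", "magnetic", "potential"],
--     ["diffusion"],
--     ["flow", "hydraulic"],
--     ["electrokinetic"],
-- ]
--
-- SRC_LABELS = ["mechanical_source", "electrical_source", "electromagnetic_source", "natural_field_source"]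
-- SRC_RULES = [
--     ["hammer", "impact", "vibroseis", "explosive", "drop weight"],
--     ["electrode", "current", "injection", "dipole"],
--     ["antenna", "radar", "em coil", "transmitter"],
--     ["gravity", "magnetic field", "natural"],
-- ]
--
-- REC_LABELS = ["seismic_sensor", "electrical_sensor", "electromagnetic_sensor", "field_sensor"]
-- REC_RULES = [
--     ["geophone", "accelerometer", "seismometer"],
--     ["electrode", "electric"],
--     ["antenna", "radar"],
--     ["gravimeter", "magnetometer"],
-- ]
--
-- OBS_LABELS = ["travel_time", "waveform_response", "voltage_response", "spectral_response", "apparent_quantity"]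
-- OBS_RULES = [
--     ["time", "travel", "traveltime", "arrival"],
--     ["amplitude", "trace", "waveform"],
--     ["voltage", "potential", "sp"],
--     ["frequency", "dispersion", "spectral"],
--     ["apparent", "transfer"],
-- ]
--
--
-- def _flatten(rules):
--     return [(kw, r) for r, kws in enumerate(rules) for kw in kws]
--
-- PROP_FLAT = _flatten(PROP_RULES)
-- SRC_FLAT = _flatten(SRC_RULES)
-- REC_FLAT = _flatten(REC_RULES)
-- OBS_FLAT = _flatten(OBS_RULES)
--
--
-- def classify(text, flat, labels, default):
--     m = min((r for kw, r in flat if kw in text), default=len(labels))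
--     return labels[m] if m < len(labels) else default
--
--
-- def add_canonical_layer(pb):
--     prop = str(pb.get("propagation", "")).lower()
--     src = str(pb.get("source", "")).lower()
--     rec = str(pb.get("receiver", "")).lower()
--     obs = str(pb.get("observable", "")).lower()
--
--     # The propagation block's irregular first branch stays explicit.
--     if "elastic" in prop or ("wave" in prop and "electro" not in prop and "gpr" not in prop):
--         prop_label = "elastic_wave_propagation"
--     else:
--         prop_label = classify(prop, PROP_FLAT, PROP_LABELS, "physical_field_propagation")
--
--     pb["propagation_canonical"] = prop_label
--     pb["source_canonical"] = classify(src, SRC_FLAT, SRC_LABELS, "unknown_source")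
--     pb["receiver_canonical"] = classify(rec, REC_FLAT, REC_LABELS, "generic_sensor")
--     pb["observable_canonical"] = classify(obs, OBS_FLAT, OBS_LABELS, "physical_response")
--     pb["medium_canonical"] = "subsurface_medium"
--     return pb
-- ===== Notes on version B (the rewrite author's own statement) =====
-- stated objective: alternative
-- what changed: Instead of short-circuiting if/elif first-match chains, B flattens each field's rules into one (keyword,rank) list, collects the ranks of ALL matching keywords, takes the numeric minimum (with len(labels) as the no-match default) and indexes a label array; all fields are read up front and the five canonical keys are assigned at the end; only the irregular propagation first branch stays explicit.
import Mathlib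
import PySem

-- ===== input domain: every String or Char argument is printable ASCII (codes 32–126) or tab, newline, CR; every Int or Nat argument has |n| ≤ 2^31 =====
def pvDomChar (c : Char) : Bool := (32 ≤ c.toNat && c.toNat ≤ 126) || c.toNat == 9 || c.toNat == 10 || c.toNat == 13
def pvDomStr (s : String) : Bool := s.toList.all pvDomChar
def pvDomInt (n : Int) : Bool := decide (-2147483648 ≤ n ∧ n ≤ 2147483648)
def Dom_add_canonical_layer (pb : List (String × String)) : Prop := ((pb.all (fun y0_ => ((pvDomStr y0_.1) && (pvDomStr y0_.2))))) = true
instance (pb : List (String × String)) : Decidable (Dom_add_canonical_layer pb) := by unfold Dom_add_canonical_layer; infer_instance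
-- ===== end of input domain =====

-- B replaces the short-circuit if/elif keyword chains by a min-over-all-matching-ranks
-- computation over flattened (keyword, rank) lists indexing a label array (alternative
-- algorithm, same cost); both versions mutate the dict in place in Python — the claim
-- is about the returned mapping.

-- ===== PORT A =====
def add_canonical_layer (pb : List (String × String)) : List (String × String) :=
  let d0 : PySem.Dict String String := ⟨pb⟩
  let prop := PySem.Str.lower (d0.getD "propagation" "")
  let d1 :=
    if PySem.Str.isIn "elastic" prop ||
       (PySem.Str.isIn "wave" prop && !PySem.Str.isIn "electro" prop && !PySem.Str.isIn "gpr" prop) then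
      d0.insert "propagation_canonical" "elastic_wave_propagation"
    else if PySem.Str.isIn "electromagnetic" prop || PySem.Str.isIn "gpr" prop then
      d0.insert "propagation_canonical" "electromagnetic_wave_propagation"
    else if PySem.Str.isIn "electrical" prop || PySem.Str.isIn "resistivity" prop || PySem.Str.isIn "conduction" prop then
      d0.insert "propagation_canonical" "electrical_conduction"
    else if PySem.Str.isIn "gravity" prop || PySem.Str.isIn "magnetic" prop || PySem.Str.isIn "potential" prop then
      d0.insert "propagation_canonical" "potential_field_response"
    else if PySem.Str.isIn "diffusion" prop then
      d0.insert "propagation_canonical" "diffusion_process"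
    else if PySem.Str.isIn "flow" prop || PySem.Str.isIn "hydraulic" prop then
      d0.insert "propagation_canonical" "fluid_flow"
    else if PySem.Str.isIn "electrokinetic" prop then
      d0.insert "propagation_canonical" "electrokinetic_coupling"
    else
      d0.insert "propagation_canonical" "physical_field_propagation"
  let src := PySem.Str.lower (d1.getD "source" "")
  let d2 :=
    if ["hammer", "impact", "vibroseis", "explosive", "drop weight"].any (fun x => PySem.Str.isIn x src) then
      d1.insert "source_canonical" "mechanical_source"
    else if ["electrode", "current", "injection", "dipole"].any (fun x => PySem.Str.isIn x src) then
      d1.insert "source_canonical" "electrical_source"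
    else if ["antenna", "radar", "em coil", "transmitter"].any (fun x => PySem.Str.isIn x src) then
      d1.insert "source_canonical" "electromagnetic_source"
    else if ["gravity", "magnetic field", "natural"].any (fun x => PySem.Str.isIn x src) then
      d1.insert "source_canonical" "natural_field_source"
    else
      d1.insert "source_canonical" "unknown_source"
  let rec_ := PySem.Str.lower (d2.getD "receiver" "")
  let d3 :=
    if ["geophone", "accelerometer", "seismometer"].any (fun x => PySem.Str.isIn x rec_) then
      d2.insert "receiver_canonical" "seismic_sensor"
    else if ["electrode", "electric"].any (fun x => PySem.Str.isIn x rec_) then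
      d2.insert "receiver_canonical" "electrical_sensor"
    else if ["antenna", "radar"].any (fun x => PySem.Str.isIn x rec_) then
      d2.insert "receiver_canonical" "electromagnetic_sensor"
    else if ["gravimeter", "magnetometer"].any (fun x => PySem.Str.isIn x rec_) then
      d2.insert "receiver_canonical" "field_sensor"
    else
      d2.insert "receiver_canonical" "generic_sensor"
  let obs := PySem.Str.lower (d3.getD "observable" "")
  let d4 :=
    if ["time", "travel", "traveltime", "arrival"].any (fun x => PySem.Str.isIn x obs) then
      d3.insert "observable_canonical" "travel_time"
    else if ["amplitude", "trace", "waveform"].any (fun x => PySem.Str.isIn x obs) then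
      d3.insert "observable_canonical" "waveform_response"
    else if ["voltage", "potential", "sp"].any (fun x => PySem.Str.isIn x obs) then
      d3.insert "observable_canonical" "voltage_response"
    else if ["frequency", "dispersion", "spectral"].any (fun x => PySem.Str.isIn x obs) then
      d3.insert "observable_canonical" "spectral_response"
    else if ["apparent", "transfer"].any (fun x => PySem.Str.isIn x obs) then
      d3.insert "observable_canonical" "apparent_quantity"
    else
      d3.insert "observable_canonical" "physical_response"
  let d5 := d4.insert "medium_canonical" "subsurface_medium"
  d5.items

-- ===== PORT B =====
def propLabels : List String :=
  ["electromagnetic_wave_propagation", "electrical_conduction", "potential_field_response",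
   "diffusion_process", "fluid_flow", "electrokinetic_coupling"]
def propRules : List (List String) :=
  [["electromagnetic", "gpr"], ["electrical", "resistivity", "conduction"],
   ["gravity", "magnetic", "potential"], ["diffusion"], ["flow", "hydraulic"], ["electrokinetic"]]

def srcLabels : List String :=
  ["mechanical_source", "electrical_source", "electromagnetic_source", "natural_field_source"]
def srcRules : List (List String) :=
  [["hammer", "impact", "vibroseis", "explosive", "drop weight"],
   ["electrode", "current", "injection", "dipole"],
   ["antenna", "radar", "em coil", "transmitter"],
   ["gravity", "magnetic field", "natural"]]

def recLabels : List String :=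
  ["seismic_sensor", "electrical_sensor", "electromagnetic_sensor", "field_sensor"]
def recRules : List (List String) :=
  [["geophone", "accelerometer", "seismometer"], ["electrode", "electric"],
   ["antenna", "radar"], ["gravimeter", "magnetometer"]]

def obsLabels : List String :=
  ["travel_time", "waveform_response", "voltage_response", "spectral_response", "apparent_quantity"]
def obsRules : List (List String) :=
  [["time", "travel", "traveltime", "arrival"], ["amplitude", "trace", "waveform"],
   ["voltage", "potential", "sp"], ["frequency", "dispersion", "spectral"], ["apparent", "transfer"]]

-- _flatten: [(kw, r) for r, kws in enumerate(rules) for kw in kws]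
def flattenRules (rules : List (List String)) : List (String × Nat) :=
  rules.zipIdx.flatMap (fun e => e.1.map (fun kw => (kw, e.2)))

def propFlat : List (String × Nat) := flattenRules propRules
def srcFlat : List (String × Nat) := flattenRules srcRules
def recFlat : List (String × Nat) := flattenRules recRules
def obsFlat : List (String × Nat) := flattenRules obsRules

-- min((r for kw, r in flat if kw in text), default=d)
def minRank (text : String) : List (String × Nat) → Nat → Nat
  | [], d => d
  | (kw, r) :: rest, d =>
    if PySem.Str.isIn kw text then min r (minRank text rest d) else minRank text rest d

def classify (text : String) (flat : List (String × Nat)) (labels : List String) (dflt : String) : String :=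
  let m := minRank text flat labels.length
  if m < labels.length then labels.getD m dflt else dflt

def add_canonical_layer_alt (pb : List (String × String)) : List (String × String) :=
  let d0 : PySem.Dict String String := ⟨pb⟩
  let prop := PySem.Str.lower (d0.getD "propagation" "")
  let src := PySem.Str.lower (d0.getD "source" "")
  let rec_ := PySem.Str.lower (d0.getD "receiver" "")
  let obs := PySem.Str.lower (d0.getD "observable" "")
  let propLabel :=
    if PySem.Str.isIn "elastic" prop ||
       (PySem.Str.isIn "wave" prop && !PySem.Str.isIn "electro" prop && !PySem.Str.isIn "gpr" prop) then
      "elastic_wave_propagation"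
    else classify prop propFlat propLabels "physical_field_propagation"
  (((((d0.insert "propagation_canonical" propLabel).insert
      "source_canonical" (classify src srcFlat srcLabels "unknown_source")).insert
      "receiver_canonical" (classify rec_ recFlat recLabels "generic_sensor")).insert
      "observable_canonical" (classify obs obsFlat obsLabels "physical_response")).insert
      "medium_canonical" "subsurface_medium").items

-- ===== PRECONDITION & SPEC =====
def Spec_add_canonical_layer (pb : List (String × String)) (out : List (String × String)) : Prop := out = add_canonical_layer_alt pb
instance (pb : List (String × String)) (out : List (String × String)) : Decidable (Spec_add_canonical_layer pb out) := by unfold Spec_add_canonical_layer; infer_instance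

-- ===== CLAIM (what is proved, stated in full; the proofs are below) =====
def Claim_equal_add_canonical_layer : Prop := ∀ (pb : List (String × String)), Dom_add_canonical_layer pb → Spec_add_canonical_layer pb (add_canonical_layer pb)

-- ===== LEMMAS AND PROOFS =====

-- index of the first rule one of whose keywords is a substring (length if none)
def firstIdx (text : String) : List (List String) → Nat
  | [] => 0
  | kws :: rest =>
    if kws.any (fun k => PySem.Str.isIn k text) then 0 else firstIdx text rest + 1

def flatFrom (text : String) : List (List String) → Nat → List (String × Nat)
  | [], _ => []
  | kws :: rest, i => kws.map (fun k => (k, i)) ++ flatFrom text rest (i + 1)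

theorem flattenRules_eq_flatFrom (text : String) (rules : List (List String)) :
    ∀ i, (rules.zipIdx i).flatMap (fun e => e.1.map (fun kw => (kw, e.2))) = flatFrom text rules i := by
  induction rules with
  | nil => intro i; rfl
  | cons kws rest ih => intro i; simp [List.zipIdx_cons, flatFrom, ih]

theorem minRank_map_append (text : String) (kws : List String) (i : Nat)
    (rest : List (String × Nat)) (d : Nat) :
    minRank text (kws.map (fun k => (k, i)) ++ rest) d =
      if kws.any (fun k => PySem.Str.isIn k text) then min i (minRank text rest d)
      else minRank text rest d := by
  induction kws with
  | nil => simp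
  | cons kw kws ih =>
    simp only [List.map_cons, List.cons_append, minRank, ih, List.any_cons]
    by_cases hkw : PySem.Str.isIn kw text = true
    · by_cases hany : (kws.any fun k => PySem.Str.isIn k text) = true
      · rw [if_pos hkw, if_pos hany, if_pos (by rw [hkw, Bool.true_or])]; omega
      · rw [if_pos hkw, if_neg hany, if_pos (by rw [hkw, Bool.true_or])]
    · have hkw' : PySem.Str.isIn kw text = false := by
        cases hb : PySem.Str.isIn kw text
        · rfl
        · exact absurd hb hkw
      by_cases hany : (kws.any fun k => PySem.Str.isIn k text) = true
      · rw [if_neg hkw, if_pos hany, if_pos (by rw [hkw', hany, Bool.false_or])]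
      · have hany' : (kws.any fun k => PySem.Str.isIn k text) = false := by
          cases hb : kws.any fun k => PySem.Str.isIn k text
          · rfl
          · exact absurd hb hany
        rw [if_neg hkw, if_neg hany, if_neg (by rw [hkw', hany', Bool.false_or]; exact Bool.false_ne_true)]

theorem minRank_flatFrom_shift (text : String) (rules : List (List String)) :
    ∀ i d, minRank text (flatFrom text rules (i + 1)) (d + 1) =
      minRank text (flatFrom text rules i) d + 1 := by
  induction rules with
  | nil => intro i d; rfl
  | cons kws rest ih =>
    intro i d
    simp only [flatFrom, minRank_map_append, ih]
    split_ifs <;> omega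

theorem minRank_flatFrom_zero (text : String) (rules : List (List String)) :
    minRank text (flatFrom text rules 0) rules.length = firstIdx text rules := by
  induction rules with
  | nil => rfl
  | cons kws rest ih =>
    simp only [flatFrom, List.length_cons, minRank_map_append, firstIdx]
    have h1 : minRank text (flatFrom text rest (0 + 1)) (rest.length + 1) =
        minRank text (flatFrom text rest 0) rest.length + 1 :=
      minRank_flatFrom_shift text rest 0 rest.length
    rw [h1, ih]
    split_ifs <;> omega

theorem classify_eq_firstIdx (text : String) (rules : List (List String)) (labels : List String)
    (dflt : String) (h : labels.length = rules.length) :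
    classify text (flattenRules rules) labels dflt = labels.getD (firstIdx text rules) dflt := by
  unfold classify flattenRules
  rw [flattenRules_eq_flatFrom text rules 0, h, minRank_flatFrom_zero]
  dsimp only
  split_ifs with hlt
  · rfl
  · rw [List.getD_eq_default]
    omega

theorem getD_insert_ne_str (d : PySem.Dict String String) (k k' : String) (v dflt : String)
    (h : k' ≠ k) : (d.insert k v).getD k' dflt = d.getD k' dflt :=
  PySem.Dict.getD_insert_of_ne d v dflt h

-- per-field bridges: A's if/elif chain equals B's label lookup at the first-match index
theorem src_bridge (s : String) :
    (if ["hammer", "impact", "vibroseis", "explosive", "drop weight"].any (fun x => PySem.Str.isIn x s) then "mechanical_source"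
     else if ["electrode", "current", "injection", "dipole"].any (fun x => PySem.Str.isIn x s) then "electrical_source"
     else if ["antenna", "radar", "em coil", "transmitter"].any (fun x => PySem.Str.isIn x s) then "electromagnetic_source"
     else if ["gravity", "magnetic field", "natural"].any (fun x => PySem.Str.isIn x s) then "natural_field_source"
     else "unknown_source") = srcLabels.getD (firstIdx s srcRules) "unknown_source" := by
  simp only [srcRules, srcLabels, firstIdx, List.any_cons, List.any_nil, Bool.or_false]
  split_ifs <;> rfl

theorem rec_bridge (s : String) :
    (if ["geophone", "accelerometer", "seismometer"].any (fun x => PySem.Str.isIn x s) then "seismic_sensor"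
     else if ["electrode", "electric"].any (fun x => PySem.Str.isIn x s) then "electrical_sensor"
     else if ["antenna", "radar"].any (fun x => PySem.Str.isIn x s) then "electromagnetic_sensor"
     else if ["gravimeter", "magnetometer"].any (fun x => PySem.Str.isIn x s) then "field_sensor"
     else "generic_sensor") = recLabels.getD (firstIdx s recRules) "generic_sensor" := by
  simp only [recRules, recLabels, firstIdx, List.any_cons, List.any_nil, Bool.or_false]
  split_ifs <;> rfl

theorem obs_bridge (s : String) :
    (if ["time", "travel", "traveltime", "arrival"].any (fun x => PySem.Str.isIn x s) then "travel_time"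
     else if ["amplitude", "trace", "waveform"].any (fun x => PySem.Str.isIn x s) then "waveform_response"
     else if ["voltage", "potential", "sp"].any (fun x => PySem.Str.isIn x s) then "voltage_response"
     else if ["frequency", "dispersion", "spectral"].any (fun x => PySem.Str.isIn x s) then "spectral_response"
     else if ["apparent", "transfer"].any (fun x => PySem.Str.isIn x s) then "apparent_quantity"
     else "physical_response") = obsLabels.getD (firstIdx s obsRules) "physical_response" := by
  simp only [obsRules, obsLabels, firstIdx, List.any_cons, List.any_nil, Bool.or_false]
  split_ifs <;> rfl

theorem prop_bridge (s : String) :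
    (if PySem.Str.isIn "electromagnetic" s || PySem.Str.isIn "gpr" s then "electromagnetic_wave_propagation"
     else if PySem.Str.isIn "electrical" s || PySem.Str.isIn "resistivity" s || PySem.Str.isIn "conduction" s then "electrical_conduction"
     else if PySem.Str.isIn "gravity" s || PySem.Str.isIn "magnetic" s || PySem.Str.isIn "potential" s then "potential_field_response"
     else if PySem.Str.isIn "diffusion" s then "diffusion_process"
     else if PySem.Str.isIn "flow" s || PySem.Str.isIn "hydraulic" s then "fluid_flow"
     else if PySem.Str.isIn "electrokinetic" s then "electrokinetic_coupling"
     else "physical_field_propagation") = propLabels.getD (firstIdx s propRules) "physical_field_propagation" := by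
  simp only [propRules, propLabels, firstIdx, List.any_cons, List.any_nil, Bool.or_false, Bool.or_assoc]
  split_ifs <;> rfl

theorem insert_ite (d : PySem.Dict String String) (k : String) (b : Bool) (v1 v2 : String) :
    (if b then d.insert k v1 else d.insert k v2) = d.insert k (if b then v1 else v2) := by
  cases b <;> rfl

theorem classify_src (s : String) :
    classify s srcFlat srcLabels "unknown_source" = srcLabels.getD (firstIdx s srcRules) "unknown_source" := by
  unfold srcFlat; exact classify_eq_firstIdx _ _ _ _ rfl

theorem classify_rec (s : String) :
    classify s recFlat recLabels "generic_sensor" = recLabels.getD (firstIdx s recRules) "generic_sensor" := by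
  unfold recFlat; exact classify_eq_firstIdx _ _ _ _ rfl

theorem classify_obs (s : String) :
    classify s obsFlat obsLabels "physical_response" = obsLabels.getD (firstIdx s obsRules) "physical_response" := by
  unfold obsFlat; exact classify_eq_firstIdx _ _ _ _ rfl

theorem classify_prop (s : String) :
    classify s propFlat propLabels "physical_field_propagation" = propLabels.getD (firstIdx s propRules) "physical_field_propagation" := by
  unfold propFlat; exact classify_eq_firstIdx _ _ _ _ rfl

-- ===== VERDICT (by name: the statement is the Claim_ definition above) =====
set_option maxHeartbeats 2000000 in
theorem add_canonical_layer_spec : Claim_equal_add_canonical_layer := by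
  intro pb _
  unfold Spec_add_canonical_layer add_canonical_layer add_canonical_layer_alt
  simp only [insert_ite,
    getD_insert_ne_str _ _ _ _ _ (by decide : ("source" : String) ≠ "propagation_canonical"),
    getD_insert_ne_str _ _ _ _ _ (by decide : ("receiver" : String) ≠ "source_canonical"),
    getD_insert_ne_str _ _ _ _ _ (by decide : ("receiver" : String) ≠ "propagation_canonical"),
    getD_insert_ne_str _ _ _ _ _ (by decide : ("observable" : String) ≠ "receiver_canonical"),
    getD_insert_ne_str _ _ _ _ _ (by decide : ("observable" : String) ≠ "source_canonical"),
    getD_insert_ne_str _ _ _ _ _ (by decide : ("observable" : String) ≠ "propagation_canonical"),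
    src_bridge, rec_bridge, obs_bridge, prop_bridge,
    classify_src, classify_rec, classify_obs, classify_prop]
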